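-- pv_equiv track=rewrite | github.com/Delfiiina/python | clasesLabos/Practica-Parcial/Parcial_Viejo_6del11.py | matriz_capicua
-- ===== SOURCE A (Python) =====
-- from queue import LifoQueue as Pila, Queue as Cola
--
-- def es_capicua (fila:list[int]) -> bool:
--     pila : Pila [int] = Pila ()
--     matriz_dada_vuelta : list [int] = []
--
--     for elem in fila:
--         pila.put(elem)
--     while not pila.empty():
--         elemento : int = pila.get()
--         matriz_dada_vuelta.append(elemento)
--
--     return (list(fila)== list(matriz_dada_vuelta))
--
-- def matriz_capicua (m:list[list[int]]) -> bool:
--     valores : list[bool] = []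
--
--     for fila in m:
--         if es_capicua(fila):
--             valores.append(True)
--         else:
--             valores.append(False)
--
--     for valor in valores:
--         if valor == False:
--             return valor
--     return True
-- ===== SOURCE B (Python) =====
-- def _es_pal(fila):
--     i, j = 0, len(fila) - 1
--     while i < j:
--         if fila[i] != fila[j]:
--             return False
--         i += 1
--         j -= 1
--     return True
--
-- def matriz_capicua(m):
--     return all(_es_pal(fila) for fila in m)
-- ===== Notes on version B (the rewrite author's own statement) =====
-- stated objective: simpler
-- what changed: Replaces the stack-based reverse-and-compare per row plus a second scan over a collected list of booleans with an in-place two-pointer palindrome test short-circuited over the rows by all().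
import Mathlib
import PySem

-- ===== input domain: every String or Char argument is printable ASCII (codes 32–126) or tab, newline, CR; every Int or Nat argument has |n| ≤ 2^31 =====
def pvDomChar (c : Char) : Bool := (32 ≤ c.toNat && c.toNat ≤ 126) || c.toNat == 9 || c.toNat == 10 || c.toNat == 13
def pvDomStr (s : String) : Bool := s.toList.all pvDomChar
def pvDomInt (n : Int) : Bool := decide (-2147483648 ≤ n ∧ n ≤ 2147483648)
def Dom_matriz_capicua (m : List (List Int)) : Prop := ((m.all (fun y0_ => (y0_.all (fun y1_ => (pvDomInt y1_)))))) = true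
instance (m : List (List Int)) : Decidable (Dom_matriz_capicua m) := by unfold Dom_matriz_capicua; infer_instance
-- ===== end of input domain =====

-- B replaces A's reverse-into-a-stack-and-compare per row (plus a second scan over a
-- collected list of booleans) with a two-pointer palindrome test short-circuited over the rows.

-- ===== PORT A =====
-- the pop loop: while not pila.empty(): matriz_dada_vuelta.append(pila.get())
def pvDrain (s : List Int) (acc : List Int) : List Int :=
  match s with
  | [] => acc
  | e :: rest => pvDrain rest (acc ++ [e])

def es_capicua (fila : List Int) : Bool :=
  -- for elem in fila: pila.put(elem)   (stack as a list, top at head)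
  let pila : List Int := fila.foldl (fun s e => e :: s) []
  let matriz_dada_vuelta : List Int := pvDrain pila []
  fila == matriz_dada_vuelta

-- for valor in valores: if valor == False: return valor / return True
def pvScan (valores : List Bool) : Bool :=
  match valores with
  | [] => true
  | v :: rest => if v == false then v else pvScan rest

def matriz_capicua (m : List (List Int)) : Bool :=
  let valores : List Bool :=
    m.foldl (fun acc fila => acc ++ [if es_capicua fila then true else false]) []
  pvScan valores

-- ===== PORT B =====
-- while i < j: if fila[i] != fila[j]: return False; i += 1; j -= 1 / return True
def pal2 (xs : List Int) (i j : Nat) : Bool :=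
  if h : i < j then
    if xs.getD i 0 ≠ xs.getD j 0 then false
    else pal2 xs (i + 1) (j - 1)
  else true
termination_by j - i

def matriz_capicua_alt (m : List (List Int)) : Bool :=
  m.all (fun fila => pal2 fila 0 (fila.length - 1))

-- ===== PRECONDITION & SPEC =====
def Spec_matriz_capicua (m : List (List Int)) (out : Bool) : Prop := out = matriz_capicua_alt m
instance (m : List (List Int)) (out : Bool) : Decidable (Spec_matriz_capicua m out) := by unfold Spec_matriz_capicua; infer_instance

-- ===== CLAIM (what is proved, stated in full; the proofs are below) =====
def Claim_equal_matriz_capicua : Prop := ∀ (m : List (List Int)), Dom_matriz_capicua m → Spec_matriz_capicua m (matriz_capicua m)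

-- ===== LEMMAS AND PROOFS =====

theorem pvDrain_eq (s acc : List Int) : pvDrain s acc = acc ++ s := by
  induction s generalizing acc with
  | nil => simp [pvDrain]
  | cons e rest ih => simp [pvDrain, ih]

theorem foldl_cons_eq_reverse (l acc : List Int) :
    l.foldl (fun s e => e :: s) acc = l.reverse ++ acc := by
  induction l generalizing acc with
  | nil => simp
  | cons a t ih => simp [List.foldl_cons, ih]

theorem es_capicua_eq (fila : List Int) :
    es_capicua fila = decide (fila = fila.reverse) := by
  simp only [es_capicua, pvDrain_eq, foldl_cons_eq_reverse, List.append_nil, List.nil_append]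
  by_cases h : fila = fila.reverse
  · rw [decide_eq_true h]
    exact beq_iff_eq.mpr h
  · rw [decide_eq_false h]
    exact beq_eq_false_iff_ne.mpr h

-- two-pointer loop characterised by the pointwise mirror condition
theorem pal2_iff (xs : List Int) (i j : Nat) :
    pal2 xs i j = true ↔ ∀ k, i ≤ k → k ≤ j → xs.getD k 0 = xs.getD (i + j - k) 0 := by
  by_cases h : i < j
  · rw [pal2]
    simp only [h, dif_pos]
    by_cases he : xs.getD i 0 = xs.getD j 0
    · simp only [he, ne_eq, not_true_eq_false, if_false, pal2_iff xs (i+1) (j-1)]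
      constructor
      · intro hmid k hik hkj
        by_cases hki : k = i
        · subst hki
          have harith : k + j - k = j := by omega
          rw [harith]; exact he
        · by_cases hkj' : k = j
          · subst hkj'
            have harith : i + k - k = i := by omega
            rw [harith]; exact he.symm
          · have := hmid k (by omega) (by omega)
            have harith : i + 1 + (j - 1) - k = i + j - k := by omega
            rwa [harith] at this
      · intro hall k hik hkj
        have := hall k (by omega) (by omega)
        have harith : i + 1 + (j - 1) - k = i + j - k := by omega
        rw [harith]; exact this
    · simp only [he, ne_eq, not_false_eq_true, if_true]
      constructor
      · intro hfalse; exact absurd hfalse (by decide)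
      · intro hall
        have := hall i (le_refl i) (by omega)
        have harith : i + j - i = j := by omega
        rw [harith] at this
        exact absurd this he
  · rw [pal2]
    simp only [h, dif_neg, not_false_iff, true_iff]
    intro k hik hkj
    have hki : k = i := by omega
    have hkj2 : k = j := by omega
    subst hki
    simp [hkj2]
termination_by j - i

theorem reverse_iff_mirror (xs : List Int) :
    xs = xs.reverse ↔ ∀ k, k < xs.length → xs.getD k 0 = xs.getD (xs.length - 1 - k) 0 := by
  constructor
  · intro hrev k hk
    conv_lhs => rw [hrev]
    rw [List.getD_eq_getElem?_getD, List.getD_eq_getElem?_getD]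
    rw [List.getElem?_reverse hk]
  · intro hall
    apply List.ext_getElem (by simp)
    intro k h1 h2
    have hk : k < xs.length := h1
    have := hall (xs.length - 1 - k) (by omega)
    have harith : xs.length - 1 - (xs.length - 1 - k) = k := by omega
    rw [harith] at this
    have hrev : xs.reverse[k] = xs[xs.length - 1 - k] := by
      rw [List.getElem_reverse]
    rw [hrev]
    have ha : xs.getD k 0 = xs[k] := List.getD_eq_getElem xs 0 hk
    have hb : xs.getD (xs.length - 1 - k) 0 = xs[xs.length - 1 - k] :=
      List.getD_eq_getElem xs 0 (by omega)
    rw [ha, hb] at this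
    exact this.symm

theorem pal2_eq_reverse (xs : List Int) :
    pal2 xs 0 (xs.length - 1) = decide (xs = xs.reverse) := by
  rcases Nat.eq_zero_or_pos xs.length with h0 | hpos
  · have : xs = [] := List.length_eq_zero_iff.mp h0
    subst this
    rw [pal2]
    rfl
  · by_cases hrev : xs = xs.reverse
    · rw [decide_eq_true hrev, pal2_iff]
      intro k h0k hk
      have := (reverse_iff_mirror xs).mp hrev k (by omega)
      simpa using this
    · simp only [hrev, decide_false]
      by_contra hne
      have hpal : pal2 xs 0 (xs.length - 1) = true := by
        cases hb : pal2 xs 0 (xs.length - 1) with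
        | true => rfl
        | false => exact absurd hb hne
      have := (pal2_iff xs 0 (xs.length - 1)).mp hpal
      apply hrev
      rw [reverse_iff_mirror]
      intro k hk
      have := this k (by omega) (by omega)
      simpa using this

theorem pvScan_eq_all (l : List Bool) : pvScan l = l.all id := by
  induction l with
  | nil => rfl
  | cons v rest ih =>
    cases v <;> simp [pvScan, ih]

theorem valores_eq (m : List (List Int)) (acc : List Bool) :
    m.foldl (fun acc fila => acc ++ [if es_capicua fila then true else false]) acc
      = acc ++ m.map (fun fila => es_capicua fila) := by
  induction m generalizing acc with
  | nil => simp
  | cons fila rest ih =>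
    simp only [List.foldl_cons, ih, List.map_cons]
    have : (if es_capicua fila then true else false) = es_capicua fila := by
      cases es_capicua fila <;> rfl
    rw [this]
    simp

-- ===== VERDICT (by name: the statement is the Claim_ definition above) =====
theorem matriz_capicua_spec : Claim_equal_matriz_capicua := by
  intro m hd
  clear hd
  unfold Spec_matriz_capicua matriz_capicua matriz_capicua_alt
  rw [valores_eq, List.nil_append, pvScan_eq_all, List.all_map]
  induction m with
  | nil => rfl
  | cons fila rest ih =>
    simp only [List.all_cons, ih]
    congr 1
    simp only [Function.comp_apply, id_eq]
    rw [es_capicua_eq, pal2_eq_reverse]
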